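-- pv_equiv track=rewrite | github.com/TetianaHrunyk/DailyCodingProblems | challenge60.py | partition_helper
-- ===== SOURCE A (Python) =====
-- def partition_helper(mset, start, end, outer_sum, inner_sum):
--     if start >= end:
--         return False
--     if outer_sum == inner_sum:
--         return True
--
--     return \
--         partition_helper(mset, start + 1, end, outer_sum + mset[start],
--                          inner_sum - mset[start]) or \
--         partition_helper(mset, start, end - 1, outer_sum + mset[end],
--                          inner_sum - mset[end])
-- ===== SOURCE B (Python) =====
-- def partition_helper(mset, start, end, outer_sum, inner_sum):
--     if start >= end:
--         return False
--     n = end - start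
--     target = inner_sum - outer_sum
--     # first_b[2*suffix_sum(b)] = smallest b (elements taken from the right) reaching that doubled sum
--     first_b = {}
--     s = 0
--     for b in range(n):
--         if 2 * s not in first_b:
--             first_b[2 * s] = b
--         s += mset[end - b]
--     s = 0
--     for a in range(n):
--         b = first_b.get(target - 2 * s)
--         if b is not None and a + b < n:
--             return True
--         s += mset[start + a]
--     return False
-- ===== Notes on version B (the rewrite author's own statement) =====
-- stated objective: alternative
-- what changed: Replaces the take-left-or-take-right search recursion with a single pass building a dict mapping each doubled suffix sum to the smallest count of elements taken from the right, then one pass over prefix counts with running sums and dict lookups.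
-- outside the precondition, e.g. on partition_helper([1], 0, 5, 0, 2): A returns True, B raises IndexError
import Mathlib
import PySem

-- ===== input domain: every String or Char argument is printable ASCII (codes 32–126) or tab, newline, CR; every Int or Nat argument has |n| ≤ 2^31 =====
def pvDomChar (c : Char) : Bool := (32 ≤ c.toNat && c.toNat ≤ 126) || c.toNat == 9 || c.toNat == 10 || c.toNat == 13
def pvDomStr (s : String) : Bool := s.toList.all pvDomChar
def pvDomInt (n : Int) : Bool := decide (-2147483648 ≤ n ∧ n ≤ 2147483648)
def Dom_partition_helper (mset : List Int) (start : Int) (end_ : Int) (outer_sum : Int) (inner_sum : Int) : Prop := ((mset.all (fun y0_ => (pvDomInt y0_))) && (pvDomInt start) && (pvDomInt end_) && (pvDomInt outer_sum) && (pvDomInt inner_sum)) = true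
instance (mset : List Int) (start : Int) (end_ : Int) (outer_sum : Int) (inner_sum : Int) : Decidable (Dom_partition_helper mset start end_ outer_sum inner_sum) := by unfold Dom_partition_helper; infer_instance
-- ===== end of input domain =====

-- B replaces A's take-left-or-take-right search recursion by a dict of doubled suffix sums
-- (smallest right-count per sum) plus one scan over prefix counts with running sums.


-- ===== PORT A =====
def partition_helper (mset : List Int) (start : Int) (end_ : Int) (outer_sum : Int) (inner_sum : Int) : Bool :=
  if start ≥ end_ then false
  else if outer_sum == inner_sum then true
  else
    match PySem.List.pyGet? mset start, PySem.List.pyGet? mset end_ with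
    | some x, some y =>
        partition_helper mset (start + 1) end_ (outer_sum + x) (inner_sum - x) ||
        partition_helper mset start (end_ - 1) (outer_sum + y) (inner_sum - y)
    | _, _ => false  -- IndexError in Python; such inputs are excluded by Pre_
termination_by (end_ - start).toNat
decreasing_by all_goals (simp_wf; omega)

-- ===== PORT B =====
-- mset[k]; under Pre_ every access is in range, so the default is never used
def pvGetv (mset : List Int) (k : Int) : Int := (PySem.List.pyGet? mset k).getD 0

-- 'for b in range(n): if 2*s not in first_b: first_b[2*s] = b; s += mset[end-b]'
def pvBuild (mset : List Int) (end_ : Int) (d : PySem.Dict Int Int) (s : Int) (bs : List Int) : PySem.Dict Int Int :=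
  match bs with
  | [] => d
  | b :: rest =>
    pvBuild mset end_
      (if d.contains (2 * s) then d else d.insert (2 * s) b)
      (s + pvGetv mset (end_ - b)) rest

-- 'for a in range(n): b = first_b.get(target - 2*s); if b is not None and a + b < n: return True; s += mset[start+a]'
def pvScan (mset : List Int) (start : Int) (n : Int) (target : Int) (d : PySem.Dict Int Int) (s : Int) (as_ : List Int) : Bool :=
  match as_ with
  | [] => false
  | a :: rest =>
    match d.get? (target - 2 * s) with
    | some b =>
        if a + b < n then true
        else pvScan mset start n target d (s + pvGetv mset (start + a)) rest
    | none => pvScan mset start n target d (s + pvGetv mset (start + a)) rest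

def partition_helper_alt (mset : List Int) (start : Int) (end_ : Int) (outer_sum : Int) (inner_sum : Int) : Bool :=
  if start ≥ end_ then false
  else
    pvScan mset start (end_ - start) (inner_sum - outer_sum)
      (pvBuild mset end_ PySem.Dict.empty 0 (PySem.List.pyRange 0 (end_ - start) 1))
      0 (PySem.List.pyRange 0 (end_ - start) 1)

-- ===== PRECONDITION & SPEC =====
-- Pre_ excludes inputs whose index window [start, end_] reaches outside the list's valid Python
-- index range: there both programs raise IndexError, except that A's short-circuit search can
-- return True before touching the bad index while B's eager scan still raises.
def Pre_partition_helper (mset : List Int) (start : Int) (end_ : Int) (outer_sum : Int) (inner_sum : Int) : Prop :=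
  end_ ≤ start ∨ (-(mset.length : Int) ≤ start ∧ end_ < (mset.length : Int))
instance (mset : List Int) (start : Int) (end_ : Int) (outer_sum : Int) (inner_sum : Int) : Decidable (Pre_partition_helper mset start end_ outer_sum inner_sum) := by unfold Pre_partition_helper; infer_instance

def pvWitness_partition_helper : List Int × Int × Int × Int × Int := ([3, 1, 1, 2, 2, 1], 0, 5, 0, 10)

def Spec_partition_helper (mset : List Int) (start : Int) (end_ : Int) (outer_sum : Int) (inner_sum : Int) (out : Bool) : Prop := out = partition_helper_alt mset start end_ outer_sum inner_sum
instance (mset : List Int) (start : Int) (end_ : Int) (outer_sum : Int) (inner_sum : Int) (out : Bool) : Decidable (Spec_partition_helper mset start end_ outer_sum inner_sum out) := by unfold Spec_partition_helper; infer_instance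

-- ===== CLAIM (what is proved, stated in full; the proofs are below) =====
def Claim_equal_partition_helper : Prop := ∀ (mset : List Int) (start : Int) (end_ : Int) (outer_sum : Int) (inner_sum : Int), Dom_partition_helper mset start end_ outer_sum inner_sum → Pre_partition_helper mset start end_ outer_sum inner_sum → Spec_partition_helper mset start end_ outer_sum inner_sum (partition_helper mset start end_ outer_sum inner_sum)

-- ===== LEMMAS AND PROOFS =====

-- sum of the first a elements taken from the left starting at s (with Python index semantics)
def prefS (mset : List Int) (s : Int) : Nat → Int
  | 0 => 0
  | a + 1 => prefS mset s a + pvGetv mset (s + a)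

-- sum of the first b elements taken from the right starting at e
def sufS (mset : List Int) (e : Int) : Nat → Int
  | 0 => 0
  | b + 1 => sufS mset e b + pvGetv mset (e - b)

-- the common specification: some reachable state of A's search has equal outer and inner sums
def Pgoal (mset : List Int) (s e o i : Int) : Prop :=
  ∃ a b : Nat, (a : Int) + (b : Int) ≤ e - s - 1 ∧
    2 * (prefS mset s a + sufS mset e b) = i - o

lemma prefS_shift (mset : List Int) (s : Int) (a : Nat) :
    prefS mset s (a + 1) = pvGetv mset s + prefS mset (s + 1) a := by
  induction a with
  | zero => simp [prefS]
  | succ a ih =>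
      show prefS mset s (a + 1) + pvGetv mset (s + (a + 1 : Nat)) = _
      rw [ih]
      show _ = pvGetv mset s + (prefS mset (s+1) a + pvGetv mset (s + 1 + a))
      have : s + ((a : Int) + 1) = s + 1 + a := by ring
      push_cast
      rw [this]; ring

lemma sufS_shift (mset : List Int) (e : Int) (b : Nat) :
    sufS mset e (b + 1) = pvGetv mset e + sufS mset (e - 1) b := by
  induction b with
  | zero => simp [sufS]
  | succ b ih =>
      show sufS mset e (b + 1) + pvGetv mset (e - (b + 1 : Nat)) = _
      rw [ih]
      show _ = pvGetv mset e + (sufS mset (e-1) b + pvGetv mset (e - 1 - b))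
      have : e - ((b : Int) + 1) = e - 1 - b := by ring
      push_cast
      rw [this]; ring

lemma Pgoal_step (mset : List Int) (s e o i : Int) (hse : s < e) (hne : o ≠ i) :
    Pgoal mset s e o i ↔
      (Pgoal mset (s + 1) e (o + pvGetv mset s) (i - pvGetv mset s) ∨
       Pgoal mset s (e - 1) (o + pvGetv mset e) (i - pvGetv mset e)) := by
  constructor
  · rintro ⟨a, b, hab, heq⟩
    match a, b with
    | 0, 0 =>
        exfalso; apply hne
        simp [prefS, sufS] at heq; omega
    | a + 1, b =>
        left
        refine ⟨a, b, by push_cast at hab ⊢; omega, ?_⟩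
        rw [prefS_shift] at heq
        linarith
    | 0, b + 1 =>
        right
        refine ⟨0, b, by push_cast at hab ⊢; omega, ?_⟩
        rw [sufS_shift] at heq
        simp [prefS] at heq ⊢
        linarith
  · rintro (⟨a, b, hab, heq⟩ | ⟨a, b, hab, heq⟩)
    · refine ⟨a + 1, b, by push_cast at hab ⊢; omega, ?_⟩
      rw [prefS_shift]
      linarith
    · refine ⟨a, b + 1, by push_cast at hab ⊢; omega, ?_⟩
      rw [sufS_shift]
      linarith

lemma Pgoal_not_of_ge (mset : List Int) (s e o i : Int) (h : e ≤ s) :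
    ¬ Pgoal mset s e o i := by
  rintro ⟨a, b, hab, -⟩
  have ha : (0 : Int) ≤ a := Int.natCast_nonneg a
  have hb : (0 : Int) ≤ b := Int.natCast_nonneg b
  omega

lemma pyGet?_some_of_range (mset : List Int) (k : Int)
    (h1 : -(mset.length : Int) ≤ k) (h2 : k < (mset.length : Int)) :
    PySem.List.pyGet? mset k = some (pvGetv mset k) := by
  have : PySem.List.pyGet? mset k ≠ none := by
    intro hc
    rw [PySem.List.pyGet?_eq_none_iff] at hc
    exact hc ⟨h1, h2⟩
  cases hx : PySem.List.pyGet? mset k with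
  | none => exact absurd hx this
  | some x => simp [pvGetv, hx]

-- characterisation of A's port
lemma A_char (mset : List Int) : ∀ (k : Nat) (s e o i : Int), (e - s).toNat ≤ k →
    -(mset.length : Int) ≤ s → e < (mset.length : Int) →
    (partition_helper mset s e o i = true ↔ Pgoal mset s e o i) := by
  intro k
  induction k with
  | zero =>
      intro s e o i hk _ _
      have hse : e ≤ s := by omega
      rw [partition_helper]
      simp [show s ≥ e from hse, Pgoal_not_of_ge mset s e o i hse]
  | succ k ih =>
      intro s e o i hk hs he
      by_cases hse : s ≥ e
      · rw [partition_helper]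
        simp [hse, Pgoal_not_of_ge mset s e o i hse]
      · have hlt : s < e := by omega
        by_cases hoi : o = i
        · rw [partition_helper]
          simp [hse, hoi]
          exact ⟨0, 0, by simp [prefS, sufS]; omega⟩
        · have hxs : PySem.List.pyGet? mset s = some (pvGetv mset s) :=
            pyGet?_some_of_range mset s hs (by omega)
          have hxe : PySem.List.pyGet? mset e = some (pvGetv mset e) :=
            pyGet?_some_of_range mset e (by omega) he
          rw [partition_helper]
          simp only [ge_iff_le, hse, if_false, beq_iff_eq, hoi, if_false, hxs, hxe]
          rw [Bool.or_eq_true,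
            ih (s + 1) e (o + pvGetv mset s) (i - pvGetv mset s) (by omega) (by omega) he,
            ih s (e - 1) (o + pvGetv mset e) (i - pvGetv mset e) (by omega) hs (by omega),
            Pgoal_step mset s e o i hlt hoi]

-- keys already present in the dict survive pvBuild with their value (it only inserts absent keys)
lemma build_persist (mset : List Int) (e : Int) :
    ∀ (bs : List Int) (d : PySem.Dict Int Int) (s v b : Int),
      d.get? v = some b → (pvBuild mset e d s bs).get? v = some b := by
  intro bs
  induction bs with
  | nil => intro d s v b h; exact h
  | cons b0 rest ih =>
      intro d s v b h
      show (pvBuild mset e (if d.contains (2*s) then d else d.insert (2*s) b0) (s + pvGetv mset (e - b0)) rest).get? v = some b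
      by_cases hc : d.contains (2 * s) = true
      · rw [if_pos hc]; exact ih _ _ _ _ h
      · rw [if_neg hc]
        apply ih
        by_cases hv : v = 2 * s
        · exfalso
          rw [PySem.Dict.contains_eq_isSome_get?, ← hv, h] at hc
          exact hc rfl
        · rw [PySem.Dict.get?_insert]
          rw [if_neg hv]
          exact h

-- the built dict maps a doubled suffix sum to the SMALLEST count b reaching it
lemma build_spec (mset : List Int) (e : Int) :
    ∀ (m : Nat) (K M : Int) (d : PySem.Dict Int Int), 0 ≤ K → (M - K).toNat ≤ m →
    (∀ v b, d.get? v = some b → ∃ b' : Nat, (b' : Int) = b ∧ (b' : Int) < K ∧ 2 * sufS mset e b' = v) →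
    ((∀ v b, (pvBuild mset e d (sufS mset e K.toNat) (PySem.List.pyRange K M 1)).get? v = some b →
        ∃ b' : Nat, (b' : Int) = b ∧ 2 * sufS mset e b' = v) ∧
     (∀ (v : Int) (j : Nat), K ≤ (j : Int) → (j : Int) < M → 2 * sufS mset e j = v →
        ∃ b' : Nat, (pvBuild mset e d (sufS mset e K.toNat) (PySem.List.pyRange K M 1)).get? v = some (b' : Int) ∧
          2 * sufS mset e b' = v ∧ b' ≤ j)) := by
  intro m
  induction m with
  | zero =>
      intro K M d hK hm H0
      have hMK : M ≤ K := by omega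
      rw [PySem.List.pyRange_one_eq_nil hMK]
      constructor
      · intro v b h
        obtain ⟨b', h1, -, h3⟩ := H0 v b h
        exact ⟨b', h1, h3⟩
      · intro v j h1 h2 _; exfalso; omega
  | succ m ih =>
      intro K M d hK hm H0
      by_cases hMK : M ≤ K
      · rw [PySem.List.pyRange_one_eq_nil hMK]
        constructor
        · intro v b h
          obtain ⟨b', h1, -, h3⟩ := H0 v b h
          exact ⟨b', h1, h3⟩
        · intro v j h1 h2 _; exfalso; omega
      · have hlt : K < M := by omega
        rw [PySem.List.pyRange_one_cons hlt]
        have hKnat : ((K.toNat : Int)) = K := Int.toNat_of_nonneg hK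
        have hsuf : sufS mset e K.toNat + pvGetv mset (e - K) = sufS mset e (K + 1).toNat := by
          have h1 : (K + 1).toNat = K.toNat + 1 := by omega
          rw [h1]
          show _ = sufS mset e K.toNat + pvGetv mset (e - (K.toNat : Int))
          rw [hKnat]
        set d1 : PySem.Dict Int Int :=
          if d.contains (2 * sufS mset e K.toNat) then d
          else d.insert (2 * sufS mset e K.toNat) K with hd1
        have hstep : pvBuild mset e d (sufS mset e K.toNat) (K :: PySem.List.pyRange (K+1) M 1)
            = pvBuild mset e d1 (sufS mset e (K+1).toNat) (PySem.List.pyRange (K+1) M 1) := by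
          rw [← hsuf]; rfl
        have H1 : ∀ v b, d1.get? v = some b →
            ∃ b' : Nat, (b' : Int) = b ∧ (b' : Int) < K + 1 ∧ 2 * sufS mset e b' = v := by
          intro v b h
          by_cases hc : d.contains (2 * sufS mset e K.toNat) = true
          · rw [hd1, if_pos hc] at h
            obtain ⟨b', h1, h2, h3⟩ := H0 v b h
            exact ⟨b', h1, by omega, h3⟩
          · rw [hd1, if_neg hc, PySem.Dict.get?_insert] at h
            by_cases hv : v = 2 * sufS mset e K.toNat
            · rw [if_pos hv] at h
              injection h with hb
              exact ⟨K.toNat, by omega, by omega, hv.symm⟩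
            · rw [if_neg hv] at h
              obtain ⟨b', h1, h2, h3⟩ := H0 v b h
              exact ⟨b', h1, by omega, h3⟩
        obtain ⟨IHs, IHc⟩ := ih (K+1) M d1 (by omega) (by omega) H1
        rw [hstep]
        constructor
        · exact IHs
        · intro v j hj1 hj2 hj3
          by_cases hjK : (j : Int) = K
          · have hjn : j = K.toNat := by omega
            have hv : v = 2 * sufS mset e K.toNat := by
              subst hjn; exact hj3.symm
            by_cases hc : d.contains (2 * sufS mset e K.toNat) = true
            · rw [PySem.Dict.contains_eq_isSome_get?] at hc
              cases hb0 : d.get? (2 * sufS mset e K.toNat) with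
              | none => rw [hb0] at hc; simp at hc
              | some b0 =>
                  obtain ⟨b0', h1, h2, h3⟩ := H0 _ _ hb0
                  refine ⟨b0', ?_, ?_, by omega⟩
                  · rw [h1]
                    apply build_persist
                    rw [hd1, if_pos (by rw [PySem.Dict.contains_eq_isSome_get?, hb0]; rfl), hv]
                    exact hb0
                  · rw [hv]; exact h3
            · refine ⟨K.toNat, ?_, ?_, by omega⟩
              · apply build_persist
                rw [hd1, if_neg hc, hv, hKnat]
                exact PySem.Dict.get?_insert_self d (2 * sufS mset e K.toNat) K
              · rw [hv]
          · obtain ⟨b', h1, h2, h3⟩ := IHc v j (by omega) hj2 hj3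
            exact ⟨b', h1, h2, h3⟩

-- characterisation of B's scanning loop, given the dict's soundness/minimality
lemma scan_char (mset : List Int) (s e n target : Int) (D : PySem.Dict Int Int)
    (SD : ∀ v b, D.get? v = some b → ∃ b' : Nat, (b' : Int) = b ∧ 2 * sufS mset e b' = v)
    (CP : ∀ (v : Int) (j : Nat), 0 ≤ (j : Int) → (j : Int) < n → 2 * sufS mset e j = v →
        ∃ b' : Nat, D.get? v = some (b' : Int) ∧ 2 * sufS mset e b' = v ∧ b' ≤ j) :
    ∀ (m : Nat) (K : Int), 0 ≤ K → (n - K).toNat ≤ m →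
    (pvScan mset s n target D (prefS mset s K.toNat) (PySem.List.pyRange K n 1) = true ↔
      ∃ a : Nat, K ≤ (a : Int) ∧ (a : Int) < n ∧
        ∃ j : Nat, (a : Int) + (j : Int) < n ∧ 2 * sufS mset e j = target - 2 * prefS mset s a) := by
  intro m
  induction m with
  | zero =>
      intro K hK hm
      have hnK : n ≤ K := by omega
      rw [PySem.List.pyRange_one_eq_nil hnK]
      simp [pvScan]
      intro a h1 h2; omega
  | succ m ih =>
      intro K hK hm
      by_cases hnK : n ≤ K
      · rw [PySem.List.pyRange_one_eq_nil hnK]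
        simp [pvScan]
        intro a h1 h2; omega
      · have hlt : K < n := by omega
        rw [PySem.List.pyRange_one_cons hlt]
        have hKnat : ((K.toNat : Int)) = K := Int.toNat_of_nonneg hK
        have hpref : prefS mset s K.toNat + pvGetv mset (s + K) = prefS mset s (K + 1).toNat := by
          have h1 : (K + 1).toNat = K.toNat + 1 := by omega
          rw [h1]
          show _ = prefS mset s K.toNat + pvGetv mset (s + (K.toNat : Int))
          rw [hKnat]
        have hrec := ih (K + 1) (by omega) (by omega)
        rw [← hpref] at hrec
        show pvScan mset s n target D (prefS mset s K.toNat) (K :: PySem.List.pyRange (K+1) n 1) = true ↔ _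
        have hhead : (pvScan mset s n target D (prefS mset s K.toNat) (K :: PySem.List.pyRange (K+1) n 1) = true)
            ↔ ((∃ j : Nat, K + (j : Int) < n ∧ 2 * sufS mset e j = target - 2 * prefS mset s K.toNat) ∨
               pvScan mset s n target D (prefS mset s K.toNat + pvGetv mset (s + K))
                 (PySem.List.pyRange (K+1) n 1) = true) := by
          show (match D.get? (target - 2 * prefS mset s K.toNat) with
                | some b => if K + b < n then true
                    else pvScan mset s n target D (prefS mset s K.toNat + pvGetv mset (s + K)) (PySem.List.pyRange (K+1) n 1)
                | none => pvScan mset s n target D (prefS mset s K.toNat + pvGetv mset (s + K)) (PySem.List.pyRange (K+1) n 1)) = true ↔ _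
          cases hD : D.get? (target - 2 * prefS mset s K.toNat) with
          | none =>
              show pvScan mset s n target D (prefS mset s K.toNat + pvGetv mset (s + K)) (PySem.List.pyRange (K+1) n 1) = true ↔ _
              constructor
              · intro h; right; exact h
              · rintro (⟨j, hj1, hj2⟩ | h)
                · obtain ⟨b', hb1, -, -⟩ := CP _ j (by omega) (by omega) hj2
                  rw [hD] at hb1; simp at hb1
                · exact h
          | some b =>
              show (if K + b < n then true
                    else pvScan mset s n target D (prefS mset s K.toNat + pvGetv mset (s + K)) (PySem.List.pyRange (K+1) n 1)) = true ↔ _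
              by_cases hbn : K + b < n
              · rw [if_pos hbn]
                constructor
                · intro _
                  left
                  obtain ⟨b', hb1, hb2⟩ := SD _ _ hD
                  exact ⟨b', by omega, hb2⟩
                · intro _; rfl
              · rw [if_neg hbn]
                constructor
                · intro h; right; exact h
                · rintro (⟨j, hj1, hj2⟩ | h)
                  · obtain ⟨b', hb1, -, hb3⟩ := CP _ j (by omega) (by omega) hj2
                    rw [hD] at hb1
                    have hbb : b = (b' : Int) := Option.some.inj hb1
                    omega
                  · exact h
        rw [hhead, hrec]
        constructor
        · rintro (⟨j, hj1, hj2⟩ | ⟨a, h1, h2, hj⟩)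
          · exact ⟨K.toNat, by omega, by omega, j, by omega, hj2⟩
          · exact ⟨a, by omega, h2, hj⟩
        · rintro ⟨a, h1, h2, j, hj1, hj2⟩
          by_cases haK : (a : Int) = K
          · left
            have ha : a = K.toNat := by omega
            subst ha
            exact ⟨j, by omega, hj2⟩
          · right
            exact ⟨a, by omega, h2, j, hj1, hj2⟩

-- characterisation of B's port
lemma B_char (mset : List Int) (s e o i : Int) (hse : s < e) :
    (partition_helper_alt mset s e o i = true ↔ Pgoal mset s e o i) := by
  have h0p : prefS mset s (0 : Int).toNat = 0 := rfl
  have h0s : sufS mset e (0 : Int).toNat = 0 := rfl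
  unfold partition_helper_alt
  rw [if_neg (by omega)]
  have hemp : ∀ v b, (PySem.Dict.empty : PySem.Dict Int Int).get? v = some b →
      ∃ b' : Nat, (b' : Int) = b ∧ (b' : Int) < 0 ∧ 2 * sufS mset e b' = v := by
    intro v b h
    rw [PySem.Dict.get?_empty] at h
    simp at h
  obtain ⟨SD, CP⟩ := build_spec mset e (e - s).toNat 0 (e - s) PySem.Dict.empty le_rfl (by omega) hemp
  rw [h0s] at SD CP
  have hscan := scan_char mset s e (e - s) (i - o)
    (pvBuild mset e PySem.Dict.empty 0 (PySem.List.pyRange 0 (e - s) 1)) SD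
    (fun v j h1 h2 h3 => CP v j h1 h2 h3)
    (e - s).toNat 0 le_rfl (by omega)
  rw [h0p] at hscan
  rw [hscan]
  constructor
  · rintro ⟨a, -, h2, j, hj1, hj2⟩
    exact ⟨a, j, by omega, by linarith⟩
  · rintro ⟨a, b, hab, heq⟩
    have hb : (0 : Int) ≤ b := Int.natCast_nonneg b
    have ha : (0 : Int) ≤ a := Int.natCast_nonneg a
    exact ⟨a, by omega, by omega, b, by omega, by linarith⟩

-- ===== VERDICT (by name: the statement is the Claim_ definition above) =====
theorem partition_helper_spec : Claim_equal_partition_helper := by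
  intro mset s e o i _ hPre
  unfold Spec_partition_helper
  by_cases hse : s ≥ e
  · rw [partition_helper]
    unfold partition_helper_alt
    simp [hse]
  · have hlt : s < e := by omega
    rcases hPre with h | ⟨h1, h2⟩
    · omega
    · have hA := A_char mset (e - s).toNat s e o i (by omega) h1 h2
      have hB := B_char mset s e o i hlt
      rw [← hB] at hA
      exact Bool.coe_iff_coe.mp hA
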